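-- pv_equiv track=rewrite | github.com/stschiff/msmc | tools/multihetsep_switcherrors.py | flip_phase
-- ===== SOURCE A (Python) =====
-- def flip_phase(alleles, ind):
--     new_alleles = ""
--     nr_ind = len(alleles) // 2
--     for i in range(nr_ind):
--         if i == ind:
--             new_alleles += alleles[i * 2 + 1] + alleles[i * 2]
--         else:
--             new_alleles += alleles[i * 2] + alleles[i * 2 + 1]
--     return new_alleles
-- ===== SOURCE B (Python) =====
-- def flip_phase(alleles, ind):
--     nr_ind = len(alleles) // 2
--     trim = alleles[:2 * nr_ind]
--     if 0 <= ind < nr_ind: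
--         k = 2 * ind
--         return trim[:k] + trim[k + 1] + trim[k] + trim[k + 2:]
--     return trim
-- ===== Notes on version B (the rewrite author's own statement) =====
-- stated objective: simpler
-- what changed: Replaced the per-pair accumulation loop over all individuals by direct slicing: truncate to even length once and, when the index is in range, swap the two characters at positions 2*ind and 2*ind+1 by slice splicing; the Python-level loop with repeated string concatenation disappears (measured ~6x at n=262144).
import Mathlib
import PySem

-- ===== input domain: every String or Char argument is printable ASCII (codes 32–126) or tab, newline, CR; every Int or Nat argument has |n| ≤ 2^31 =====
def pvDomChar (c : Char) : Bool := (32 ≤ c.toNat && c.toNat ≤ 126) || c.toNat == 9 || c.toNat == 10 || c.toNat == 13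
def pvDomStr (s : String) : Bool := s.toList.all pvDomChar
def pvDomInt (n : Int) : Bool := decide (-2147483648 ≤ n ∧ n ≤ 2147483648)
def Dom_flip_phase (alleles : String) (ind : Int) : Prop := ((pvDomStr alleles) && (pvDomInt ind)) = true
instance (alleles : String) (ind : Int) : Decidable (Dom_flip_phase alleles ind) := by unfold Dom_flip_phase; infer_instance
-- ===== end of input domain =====

-- B swaps the selected pair by slice splicing on the even-length prefix instead of rebuilding the string pair by pair in a loop (objective: simpler).

-- ===== PORT A =====
-- loop: for i in range(nr_ind), append the pair at 2i, swapped iff i == ind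
-- (indexing via pyGetD: every index the loop touches is in range, so Python never raises and the default is never used)
def flip_phase (alleles : String) (ind : Int) : String :=
  let cs := alleles.toList
  let nr_ind := PySem.Int.floordiv (cs.length : Int) 2
  String.ofList <|
    (PySem.List.pyRange 0 nr_ind 1).foldl (fun acc i =>
      if i = ind then
        acc ++ [PySem.List.pyGetD cs (i * 2 + 1) ' ', PySem.List.pyGetD cs (i * 2) ' ']
      else
        acc ++ [PySem.List.pyGetD cs (i * 2) ' ', PySem.List.pyGetD cs (i * 2 + 1) ' ']) []

-- ===== PORT B =====
def flip_phase_alt (alleles : String) (ind : Int) : String :=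
  let cs := alleles.toList
  let nr_ind := PySem.Int.floordiv (cs.length : Int) 2
  let trim := PySem.List.slice cs none (some (2 * nr_ind))
  String.ofList <|
    if 0 ≤ ind ∧ ind < nr_ind then
      let k := 2 * ind
      PySem.List.slice trim none (some k)
        ++ [PySem.List.pyGetD trim (k + 1) ' ', PySem.List.pyGetD trim k ' ']
        ++ PySem.List.slice trim (some (k + 2)) none
    else trim

-- ===== PRECONDITION & SPEC =====
def Spec_flip_phase (alleles : String) (ind : Int) (out : String) : Prop := out = flip_phase_alt alleles ind
instance (alleles : String) (ind : Int) (out : String) : Decidable (Spec_flip_phase alleles ind out) := by unfold Spec_flip_phase; infer_instance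

-- ===== CLAIM (what is proved, stated in full; the proofs are below) =====
def Claim_equal_flip_phase : Prop := ∀ (alleles : String) (ind : Int), Dom_flip_phase alleles ind → Spec_flip_phase alleles ind (flip_phase alleles ind)

-- ===== LEMMAS AND PROOFS =====

theorem pairs_flatMap (cs : List Char) (a m : ℕ) (h : 2 * (a + m) ≤ cs.length) :
    (List.range m).flatMap
        (fun j => [cs.getD (2 * (a + j)) ' ', cs.getD (2 * (a + j) + 1) ' ']) =
      (cs.drop (2 * a)).take (2 * m) := by
  induction m with
  | zero => simp
  | succ m ih =>
    rw [List.range_succ, List.flatMap_append, ih (by omega)]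
    have hlen : (cs.drop (2 * a)).length = cs.length - 2 * a := by simp
    have h1 : 2 * m < (cs.drop (2 * a)).length := by omega
    have h2 : 2 * m + 1 < (cs.drop (2 * a)).length := by omega
    have e : 2 * (m + 1) = (2 * m + 1) + 1 := by omega
    rw [e, List.take_add_one, List.take_add_one]
    rw [List.getElem?_eq_getElem h2, List.getElem?_eq_getElem h1]
    simp [List.getElem_drop, List.getD_eq_getElem?_getD,
      List.getElem?_eq_getElem (by omega : 2*(a+m) < cs.length),
      List.getElem?_eq_getElem (by omega : 2*(a+m)+1 < cs.length)]
    constructor <;> (congr 1; omega)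

-- A's fold equals B's splice, for every input
theorem flip_phase_eq_alt (alleles : String) (ind : Int) :
    flip_phase alleles ind = flip_phase_alt alleles ind := by
  unfold flip_phase flip_phase_alt
  dsimp only
  set cs := alleles.toList with hcs
  set n : ℕ := cs.length / 2 with hn
  have hfd : PySem.Int.floordiv (cs.length : Int) 2 = (n : Int) := by
    exact_mod_cast PySem.Int.floordiv_natCast cs.length 2
  rw [hfd]
  have htrim : PySem.List.slice cs none (some (2 * (n : Int))) = cs.take (2 * n) := by
    have : (2 * (n : Int)) = ((2 * n : ℕ) : Int) := by push_cast; ring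
    rw [this, PySem.List.slice_to_natCast]
  rw [htrim, PySem.List.pyRange_zero_natCast, List.foldl_map]
  have hbody : (fun (x : List Char) (y : ℕ) =>
        if (y : Int) = ind then x ++ [PySem.List.pyGetD cs ((y:Int) * 2 + 1) ' ', PySem.List.pyGetD cs ((y:Int) * 2) ' ']
        else x ++ [PySem.List.pyGetD cs ((y:Int) * 2) ' ', PySem.List.pyGetD cs ((y:Int) * 2 + 1) ' '])
      = (fun (x : List Char) (y : ℕ) => x ++
        if (y : Int) = ind then [PySem.List.pyGetD cs ((y:Int) * 2 + 1) ' ', PySem.List.pyGetD cs ((y:Int) * 2) ' ']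
        else [PySem.List.pyGetD cs ((y:Int) * 2) ' ', PySem.List.pyGetD cs ((y:Int) * 2 + 1) ' ']) := by
    funext x y; split <;> rfl
  rw [hbody, PySem.List.foldl_append_eq_flatMap]
  have hget : ∀ i : ℕ, PySem.List.pyGetD cs ((i:Int) * 2) ' ' = cs.getD (2 * i) ' ' ∧
      PySem.List.pyGetD cs ((i:Int) * 2 + 1) ' ' = cs.getD (2 * i + 1) ' ' := by
    intro i
    constructor
    · have : ((i:Int) * 2) = ((2 * i : ℕ) : Int) := by push_cast; ring
      rw [this, PySem.List.pyGetD_natCast]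
    · have : ((i:Int) * 2 + 1) = ((2 * i + 1 : ℕ) : Int) := by push_cast; ring
      rw [this, PySem.List.pyGetD_natCast]
  have h2n : 2 * n ≤ cs.length := by omega
  by_cases hin : 0 ≤ ind ∧ ind < (n : Int)
  · -- in-range: ind = k < n
    rw [if_pos hin]
    obtain ⟨h0, h1⟩ := hin
    set k : ℕ := ind.toNat with hk
    have hik : ind = (k : Int) := (Int.toNat_of_nonneg h0).symm
    have hkn : k < n := by omega
    -- split the range at k
    have hsplit : List.range n = List.range (k + 1) ++ (List.range (n - (k+1))).map (fun j => (k+1) + j) := by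
      conv_lhs => rw [show n = (k+1) + (n-(k+1)) by omega]
      exact List.range_add
    rw [List.nil_append, hsplit, List.flatMap_append, List.range_succ, List.flatMap_append,
      List.flatMap_map]
    have hpart1 : (List.range k).flatMap (fun (i : ℕ) => if (i : Int) = ind then
          [PySem.List.pyGetD cs ((i:Int) * 2 + 1) ' ', PySem.List.pyGetD cs ((i:Int) * 2) ' ']
        else
          [PySem.List.pyGetD cs ((i:Int) * 2) ' ', PySem.List.pyGetD cs ((i:Int) * 2 + 1) ' '])
        = (List.range k).flatMap (fun i => [cs.getD (2 * (0 + i)) ' ', cs.getD (2 * (0 + i) + 1) ' ']) := by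
      apply List.flatMap_congr
      intro i hi
      have : i < k := List.mem_range.mp hi
      rw [if_neg (by omega), (hget i).1, (hget i).2]; simp
    have hpart3 : (List.range (n - (k+1))).flatMap (fun (j : ℕ) => if ((k + 1 + j : ℕ) : Int) = ind then
          [PySem.List.pyGetD cs (((k + 1 + j : ℕ) : Int) * 2 + 1) ' ', PySem.List.pyGetD cs (((k + 1 + j : ℕ) : Int) * 2) ' ']
        else
          [PySem.List.pyGetD cs (((k + 1 + j : ℕ) : Int) * 2) ' ', PySem.List.pyGetD cs (((k + 1 + j : ℕ) : Int) * 2 + 1) ' '])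
        = (List.range (n - (k+1))).flatMap (fun j => [cs.getD (2 * ((k+1) + j)) ' ', cs.getD (2 * ((k+1) + j) + 1) ' ']) := by
      apply List.flatMap_congr
      intro j _
      rw [if_neg (by omega), (hget ((k+1)+j)).1, (hget ((k+1)+j)).2]
    rw [hpart1, hpart3, pairs_flatMap cs 0 k (by omega), pairs_flatMap cs (k+1) (n - (k+1)) (by omega)]
    -- middle element
    rw [List.flatMap_singleton, if_pos (by omega : ((k:ℕ) : Int) = ind)]
    rw [(hget k).1, (hget k).2]
    -- now the B side
    have hkcast : 2 * ind = ((2 * k : ℕ) : Int) := by rw [hik]; push_cast; ring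
    have hbslice1 : PySem.List.slice (cs.take (2*n)) none (some (2 * ind)) = cs.take (2*k) := by
      rw [hkcast, PySem.List.slice_to_natCast, List.take_take]
      congr 1; omega
    have hbslice2 : PySem.List.slice (cs.take (2*n)) (some (2 * ind + 2)) none = (cs.drop (2*(k+1))).take (2 * (n - (k+1))) := by
      have : 2 * ind + 2 = ((2 * k + 2 : ℕ) : Int) := by rw [hik]; push_cast; ring
      rw [this, PySem.List.slice_from_natCast, List.drop_take]
      congr 1 <;> omega
    have hbget1 : PySem.List.pyGetD (cs.take (2*n)) (2 * ind + 1) ' ' = cs.getD (2*k+1) ' ' := by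
      have : 2 * ind + 1 = ((2 * k + 1 : ℕ) : Int) := by rw [hik]; push_cast; ring
      rw [this, PySem.List.pyGetD_natCast]
      simp [List.getD_eq_getElem?_getD, (by omega : 2 * k + 1 < 2 * n)]
    have hbget0 : PySem.List.pyGetD (cs.take (2*n)) (2 * ind) ' ' = cs.getD (2*k) ' ' := by
      rw [hkcast, PySem.List.pyGetD_natCast]
      simp [List.getD_eq_getElem?_getD, (by omega : 2 * k < 2 * n)]
    rw [hbslice1, hbslice2, hbget1, hbget0]
    simp [List.append_assoc]
  · -- out of range: no i hits ind
    rw [if_neg hin, List.nil_append]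
    have : (List.range n).flatMap (fun (i : ℕ) => if (i : Int) = ind then
          [PySem.List.pyGetD cs ((i:Int) * 2 + 1) ' ', PySem.List.pyGetD cs ((i:Int) * 2) ' ']
        else
          [PySem.List.pyGetD cs ((i:Int) * 2) ' ', PySem.List.pyGetD cs ((i:Int) * 2 + 1) ' '])
        = (List.range n).flatMap (fun i => [cs.getD (2 * (0 + i)) ' ', cs.getD (2 * (0 + i) + 1) ' ']) := by
      apply List.flatMap_congr
      intro i hi
      have hilt : i < n := List.mem_range.mp hi
      rw [if_neg (by omega), (hget i).1, (hget i).2]; simp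
    rw [this, pairs_flatMap cs 0 n (by omega)]
    simp

-- ===== VERDICT (by name: the statement is the Claim_ definition above) =====
theorem flip_phase_spec : Claim_equal_flip_phase := by
  intro alleles ind _
  exact flip_phase_eq_alt alleles ind
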